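-- pv_equiv track=rewrite | github.com/Hyddrogene/scheduling-python | ASP-MODEL/python/dyn_opti.py | minimize_cost_with_choices
-- ===== SOURCE A (Python) =====
-- def minimize_cost_with_choices(costs):
--     if not costs:
--         return 0, []
--
--     n = len(costs)
--     dp = [[0] * 3 for _ in range(n)]
--     choices = [[-1] * 3 for _ in range(n)]  # Stocker les choix
--
--     # Initialiser le premier jour
--     dp[0] = costs[0]
--
--     # Calculer les coûts et stocker les choix pour les jours suivants
--     for i in range(1, n):
--         for j in range(3):  # Pour chaque vêtement
--             # Trouver le coût minimum des autres vêtements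
--             min_cost = float('inf')
--             chosen_prev = -1
--             for k in range(3):
--                 if k != j and dp[i-1][k] < min_cost:
--                     min_cost = dp[i-1][k]
--                     chosen_prev = k
--             dp[i][j] = costs[i][j] + min_cost
--             choices[i][j] = chosen_prev  # Stocker le choix précédent
--
--     # Trouver le coût minimum et son index dans la dernière ligne
--     min_cost = min(dp[-1])
--     last_choice = dp[-1].index(min_cost)
--
--     # Reconstruire les choix à rebours
--     path = []
--     current_choice = last_choice
--     for i in range(n-1, -1, -1):
--         path.append(current_choice)
--         current_choice = choices[i][current_choice]
--     path.reverse()  # Remettre dans l'ordre chronologique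
--
--     return min_cost, path
-- ===== SOURCE B (Python) =====
-- def minimize_cost_with_choices(costs):
--     # Forward path-threading DP: per state keep (accumulated cost, full path);
--     # no tables, no inner argmin scan, no backtracking pass.
--     if not costs:
--         return 0, []
--     row = costs[0]
--     s = [(row[0], [0]), (row[1], [1]), (row[2], [2])]
--     for row in costs[1:]:
--         (ca, pa), (cb, pb), (cc, pc) = s
--         n0 = (row[0] + cb, pb + [0]) if cb <= cc else (row[0] + cc, pc + [0])
--         n1 = (row[1] + ca, pa + [1]) if ca <= cc else (row[1] + cc, pc + [1])
--         n2 = (row[2] + ca, pa + [2]) if ca <= cb else (row[2] + cb, pb + [2])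
--         s = [n0, n1, n2]
--     (ca, pa), (cb, pb), (cc, pc) = s
--     if ca <= cb and ca <= cc:
--         return ca, pa
--     if cb <= cc:
--         return cb, pb
--     return cc, pc
-- ===== Notes on version B (the rewrite author's own statement) =====
-- stated objective: alternative
-- what changed: Replaced the dp/choices tables with inner 3-way argmin scans plus a backward path-reconstruction pass by a single forward pass that threads (cost, path) pairs per state with direct two-way comparisons, eliminating the tables, the inner k-loop and the backtracking loop.
-- outside the precondition, e.g. on minimize_cost_with_choices([[5]]): A returns (5, [0]), B raises IndexError; on minimize_cost_with_choices([[2, 1]]): A returns (1, [1]), B raises IndexError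
import Mathlib
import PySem

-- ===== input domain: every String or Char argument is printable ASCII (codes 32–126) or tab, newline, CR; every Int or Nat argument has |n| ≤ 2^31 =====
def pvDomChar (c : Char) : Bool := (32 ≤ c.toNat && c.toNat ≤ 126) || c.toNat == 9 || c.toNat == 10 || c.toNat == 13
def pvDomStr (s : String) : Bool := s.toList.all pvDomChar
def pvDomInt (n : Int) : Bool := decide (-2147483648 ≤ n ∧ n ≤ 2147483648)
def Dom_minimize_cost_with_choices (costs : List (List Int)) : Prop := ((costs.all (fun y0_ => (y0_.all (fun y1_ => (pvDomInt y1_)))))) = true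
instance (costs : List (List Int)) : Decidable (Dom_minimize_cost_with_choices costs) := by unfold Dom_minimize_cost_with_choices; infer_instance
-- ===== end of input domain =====

-- B replaces A's dp/choices tables + inner argmin scans + backtracking pass by one
-- forward pass threading (cost, path) pairs per state (alternative decomposition, same cost).

-- ===== PORT A =====
-- Literal transliteration of A. Python's float('inf') sentinel in the inner scan is an
-- Option Int (none = inf); it is always some when min_cost is used, so '.getD 0' is never
-- the value read.  Indexing uses pyGetD: under Pre_ every index A computes is in range,
-- so the defaults are never returned.
def minimize_cost_with_choices (costs : List (List Int)) : Int × List Int :=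
  if costs = [] then (0, [])
  else
    let n : Int := (costs.length : Int)
    let dp : List (List Int) := (List.range costs.length).map (fun _ => List.replicate 3 (0:Int))
    let choices : List (List Int) := (List.range costs.length).map (fun _ => List.replicate 3 (-1:Int))
    let dp := PySem.List.pySetD dp 0 (PySem.List.pyGetD costs 0 [])
    let st := (PySem.List.pyRange 1 n 1).foldl (fun (st : List (List Int) × List (List Int)) i =>
      (PySem.List.pyRange 0 3 1).foldl (fun (st : List (List Int) × List (List Int)) j =>
        let dp := st.1
        let choices := st.2
        let mc := (PySem.List.pyRange 0 3 1).foldl (fun (mc : Option Int × Int) k =>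
          if k ≠ j ∧ (∀ m ∈ mc.1, PySem.List.pyGetD (PySem.List.pyGetD dp (i-1) []) k 0 < m)
          then (some (PySem.List.pyGetD (PySem.List.pyGetD dp (i-1) []) k 0), k)
          else mc) (none, -1)
        let dp := PySem.List.pySetD dp i (PySem.List.pySetD (PySem.List.pyGetD dp i []) j
                    (PySem.List.pyGetD (PySem.List.pyGetD costs i []) j 0 + mc.1.getD 0))
        let choices := PySem.List.pySetD choices i (PySem.List.pySetD (PySem.List.pyGetD choices i []) j mc.2)
        (dp, choices)) st) (dp, choices)
    let dp := st.1
    let choices := st.2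
    let min_cost := (PySem.List.min? (PySem.List.pyGetD dp (-1) []) id).getD 0
    let last_choice : Int := ((PySem.List.index? (PySem.List.pyGetD dp (-1) []) min_cost).getD 0 : Nat)
    let bt := (PySem.List.pyRange (n-1) (-1) (-1)).foldl (fun (st : List Int × Int) i =>
      (st.1 ++ [st.2], PySem.List.pyGetD (PySem.List.pyGetD choices i []) st.2 0)) ([], last_choice)
    (min_cost, bt.1.reverse)

-- ===== PORT B =====
-- Literal transliteration of Source B (forward path-threading DP).
def minimize_cost_with_choices_alt (costs : List (List Int)) : Int × List Int :=
  match costs with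
  | [] => (0, [])
  | row :: rest =>
    let s0 : (Int × List Int) × (Int × List Int) × (Int × List Int) :=
      ((PySem.List.pyGetD row 0 0, [(0:Int)]),
       (PySem.List.pyGetD row 1 0, [(1:Int)]),
       (PySem.List.pyGetD row 2 0, [(2:Int)]))
    let s := rest.foldl (fun (s : (Int × List Int) × (Int × List Int) × (Int × List Int)) row =>
      let ca := s.1.1; let pa := s.1.2
      let cb := s.2.1.1; let pb := s.2.1.2
      let cc := s.2.2.1; let pc := s.2.2.2
      let n0 := if cb ≤ cc then (PySem.List.pyGetD row 0 0 + cb, pb ++ [(0:Int)])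
                else (PySem.List.pyGetD row 0 0 + cc, pc ++ [(0:Int)])
      let n1 := if ca ≤ cc then (PySem.List.pyGetD row 1 0 + ca, pa ++ [(1:Int)])
                else (PySem.List.pyGetD row 1 0 + cc, pc ++ [(1:Int)])
      let n2 := if ca ≤ cb then (PySem.List.pyGetD row 2 0 + ca, pa ++ [(2:Int)])
                else (PySem.List.pyGetD row 2 0 + cb, pb ++ [(2:Int)])
      (n0, n1, n2)) s0
    if s.1.1 ≤ s.2.1.1 ∧ s.1.1 ≤ s.2.2.1 then (s.1.1, s.1.2)
    else if s.2.1.1 ≤ s.2.2.1 then (s.2.1.1, s.2.1.2)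
    else (s.2.2.1, s.2.2.2)

-- ===== PRECONDITION & SPEC =====
-- Pre_ restricts to the natural domain of this 3-choice problem: every day's cost row has
-- at least 3 entries and, when there is a single day (A then returns min over the WHOLE row),
-- no entry beyond the first three is strictly smaller than all of the first three (A raises
-- IndexError there).  A accidentally returns on malformed single-day inputs with fewer than
-- 3 costs; B's 3-state DP raises there.
def Pre_minimize_cost_with_choices (costs : List (List Int)) : Prop :=
  (∀ row ∈ costs, 3 ≤ row.length) ∧
  (costs.length = 1 → ∀ row ∈ costs, ∀ v ∈ row.drop 3,
    min (min (row.getD 0 0) (row.getD 1 0)) (row.getD 2 0) ≤ v)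
instance (costs : List (List Int)) : Decidable (Pre_minimize_cost_with_choices costs) := by
  unfold Pre_minimize_cost_with_choices; infer_instance
def pvWitness_minimize_cost_with_choices : List (List Int) := [[3,2,2],[1,1,1],[5,0,5]]
def Spec_minimize_cost_with_choices (costs : List (List Int)) (out : Int × List Int) : Prop := out = minimize_cost_with_choices_alt costs
instance (costs : List (List Int)) (out : Int × List Int) : Decidable (Spec_minimize_cost_with_choices costs out) := by unfold Spec_minimize_cost_with_choices; infer_instance

-- ===== CLAIM (what is proved, stated in full; the proofs are below) =====
def Claim_equal_minimize_cost_with_choices : Prop := ∀ (costs : List (List Int)), Dom_minimize_cost_with_choices costs → Pre_minimize_cost_with_choices costs → Spec_minimize_cost_with_choices costs (minimize_cost_with_choices costs)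

-- ===== LEMMAS AND PROOFS =====

-- Abbreviation for B's state
abbrev PvBSt := (Int × List Int) × (Int × List Int) × (Int × List Int)

-- triple view of a length-3 row (reads with default 0, exactly as both ports do)
def pvTrip (l : List Int) : Int × Int × Int := (l.getD 0 0, l.getD 1 0, l.getD 2 0)
def pvTripList (p : Int × Int × Int) : List Int := [p.1, p.2.1, p.2.2]

-- A's inner strict-less first-wins argmin over k ≠ j, j ∈ {0,1,2}
def pvPick (p : Int × Int × Int) (j : Int) : Int × Int :=
  if j = 0 then (if p.2.1 ≤ p.2.2 then (p.2.1, 1) else (p.2.2, 2))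
  else if j = 1 then (if p.1 ≤ p.2.2 then (p.1, 0) else (p.2.2, 2))
  else (if p.1 ≤ p.2.1 then (p.1, 0) else (p.2.1, 1))

def pvDpNext (p : Int × Int × Int) (r : List Int) : Int × Int × Int :=
  (r.getD 0 0 + (pvPick p 0).1, r.getD 1 0 + (pvPick p 1).1, r.getD 2 0 + (pvPick p 2).1)
def pvChRow (p : Int × Int × Int) : List Int := [(pvPick p 0).2, (pvPick p 1).2, (pvPick p 2).2]

-- clean chain: (final dp triple, dp rows (as lists), choice rows) for the days after day 0
def pvAchain (p : Int × Int × Int) : List (List Int) → (Int × Int × Int) × List (List Int) × List (List Int)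
  | [] => (p, [], [])
  | r :: rs =>
    let p' := pvDpNext p r
    let t := pvAchain p' rs
    (t.1, pvTripList p' :: t.2.1, pvChRow p :: t.2.2)

-- backtracking through choice rows given in REVERSE day order
def pvBt : List (List Int) → Int → List Int
  | [], _ => []
  | row :: rs, cur => cur :: pvBt rs (PySem.List.pyGetD row cur 0)

-- B's model: B's own step, as a structural recursion
def pvBmodel (s : PvBSt) : List (List Int) → PvBSt
  | [] => s
  | row :: rest =>
    pvBmodel
      ((if s.2.1.1 ≤ s.2.2.1 then (PySem.List.pyGetD row 0 0 + s.2.1.1, s.2.1.2 ++ [(0:Int)])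
        else (PySem.List.pyGetD row 0 0 + s.2.2.1, s.2.2.2 ++ [(0:Int)])),
       (if s.1.1 ≤ s.2.2.1 then (PySem.List.pyGetD row 1 0 + s.1.1, s.1.2 ++ [(1:Int)])
        else (PySem.List.pyGetD row 1 0 + s.2.2.1, s.2.2.2 ++ [(1:Int)])),
       (if s.1.1 ≤ s.2.1.1 then (PySem.List.pyGetD row 2 0 + s.1.1, s.1.2 ++ [(2:Int)])
        else (PySem.List.pyGetD row 2 0 + s.2.1.1, s.2.1.2 ++ [(2:Int)]))) rest

-- the two loop bodies of port A, named for the proofs (identical to the port's lambdas)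
def pvJstep (costs : List (List Int)) (i : Int) (st : List (List Int) × List (List Int)) (j : Int) :
    List (List Int) × List (List Int) :=
  let dp := st.1
  let choices := st.2
  let mc := (PySem.List.pyRange 0 3 1).foldl (fun (mc : Option Int × Int) k =>
    if k ≠ j ∧ (∀ m ∈ mc.1, PySem.List.pyGetD (PySem.List.pyGetD dp (i-1) []) k 0 < m)
    then (some (PySem.List.pyGetD (PySem.List.pyGetD dp (i-1) []) k 0), k)
    else mc) (none, -1)
  let dp := PySem.List.pySetD dp i (PySem.List.pySetD (PySem.List.pyGetD dp i []) j
              (PySem.List.pyGetD (PySem.List.pyGetD costs i []) j 0 + mc.1.getD 0))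
  let choices := PySem.List.pySetD choices i (PySem.List.pySetD (PySem.List.pyGetD choices i []) j mc.2)
  (dp, choices)
def pvAbody (costs : List (List Int)) (st : List (List Int) × List (List Int)) (i : Int) :
    List (List Int) × List (List Int) :=
  (PySem.List.pyRange 0 3 1).foldl (pvJstep costs i) st

lemma pvKfold_eval (prev : List Int) (j : Int) (hj : j = 0 ∨ j = 1 ∨ j = 2) :
    (PySem.List.pyRange 0 3 1).foldl (fun (mc : Option Int × Int) k =>
      if k ≠ j ∧ (∀ m ∈ mc.1, PySem.List.pyGetD prev k 0 < m)
      then (some (PySem.List.pyGetD prev k 0), k)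
      else mc) (none, -1)
    = (some (pvPick (pvTrip prev) j).1, (pvPick (pvTrip prev) j).2) := by
  have hr : PySem.List.pyRange 0 3 1 = [0,1,2] := by decide
  rcases hj with h | h | h <;> subst h <;>
    simp [hr, List.foldl, pvPick, pvTrip, PySem.List.pyGetD_ofNat'] <;>
    split_ifs <;> simp_all <;> omega
lemma pvGetD_append_left {α : Type} (X Y : List α) (i : Int) (d : α)
    (h0 : 0 ≤ i) (h : i < (X.length : Int)) :
    PySem.List.pyGetD (X ++ Y) i d = PySem.List.pyGetD X i d := by
  rw [PySem.List.pyGetD_eq_getElem _ _ h0 (by simp; omega),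
      PySem.List.pyGetD_eq_getElem _ _ h0 (by simpa using h)]
  exact List.getElem_append_left (by omega)
lemma pvGetD_append_length {α : Type} (X : List α) (z : α) (Y : List α) (d : α) :
    PySem.List.pyGetD (X ++ z :: Y) (X.length : Int) d = z := by
  rw [PySem.List.pyGetD_eq_getElem _ _ (by positivity) (by simp)]
  simp
lemma pvSetD_append_left {α : Type} (X Y : List α) (i : Int) (v : α)
    (h0 : 0 ≤ i) (h : i < (X.length : Int)) :
    PySem.List.pySetD (X ++ Y) i v = PySem.List.pySetD X i v ++ Y := by
  rw [PySem.List.pySetD_of_nonneg _ _ h0, PySem.List.pySetD_of_nonneg _ _ h0]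
  exact List.set_append_left _ _ (by omega)
lemma pvSetD_append_length {α : Type} (X : List α) (z : α) (v : α) :
    PySem.List.pySetD (X ++ [z]) (X.length : Int) v = X ++ [v] := by
  simp [List.set_append_right]

lemma pvJstep_eval (costs : List (List Int)) (X Xc : List (List Int)) (prev row rowc : List Int)
    (j : Int) (hj : j = 0 ∨ j = 1 ∨ j = 2) (hX : 0 < X.length) (hlen : Xc.length = X.length)
    (hprev : PySem.List.pyGetD X ((X.length : Int) - 1) [] = prev) :
    pvJstep costs ((X.length : Int)) (X ++ [row], Xc ++ [rowc]) j
      = (X ++ [PySem.List.pySetD row j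
            (PySem.List.pyGetD (PySem.List.pyGetD costs (X.length : Int) []) j 0 + (pvPick (pvTrip prev) j).1)],
         Xc ++ [PySem.List.pySetD rowc j (pvPick (pvTrip prev) j).2]) := by
  simp only [pvJstep]
  rw [pvGetD_append_left X [row] ((X.length : Int) - 1) [] (by omega) (by omega), hprev,
      pvKfold_eval prev j hj]
  rw [show (X ++ [row] : List (List Int)) = X ++ row :: [] from rfl,
      pvGetD_append_length X row [] []]
  rw [pvSetD_append_length X row _]
  have : ((Xc.length : Int)) = ((X.length : Int)) := by omega
  rw [show (Xc ++ [rowc] : List (List Int)) = Xc ++ rowc :: [] from rfl]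
  rw [← this, pvGetD_append_length Xc rowc [] [], pvSetD_append_length Xc rowc _]
  simp
lemma pvAbody_eval (costs : List (List Int)) (X Xc : List (List Int)) (prev : List Int)
    (hX : 0 < X.length) (hlen : Xc.length = X.length)
    (hprev : PySem.List.pyGetD X ((X.length : Int) - 1) [] = prev) :
    pvAbody costs (X ++ [[0,0,0]], Xc ++ [[-1,-1,-1]]) (X.length : Int)
      = (X ++ [pvTripList (pvDpNext (pvTrip prev) (PySem.List.pyGetD costs (X.length : Int) []))],
         Xc ++ [pvChRow (pvTrip prev)]) := by
  have hr : PySem.List.pyRange 0 3 1 = [0,1,2] := by decide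
  simp only [pvAbody, hr, List.foldl]
  rw [pvJstep_eval costs X Xc prev _ _ 0 (by omega) hX hlen hprev,
      pvJstep_eval costs X Xc prev _ _ 1 (by omega) hX hlen hprev,
      pvJstep_eval costs X Xc prev _ _ 2 (by omega) hX hlen hprev]
  simp [pvTripList, pvDpNext, pvChRow, PySem.List.pyGetD_ofNat', PySem.List.pySetD, PySem.List.pySet?, PySem.List.pyIdx?]
lemma pvJstep_len (costs : List (List Int)) (i : Int) (st : List (List Int) × List (List Int)) (j : Int) :
    (pvJstep costs i st j).1.length = st.1.length ∧ (pvJstep costs i st j).2.length = st.2.length := by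
  simp [pvJstep, PySem.List.length_pySetD]
lemma pvJstep_pad (costs : List (List Int)) (dp ch : List (List Int)) (z w : List Int) (i j : Int)
    (h1 : 1 ≤ i) (hdp : i < (dp.length : Int)) (hch : i < (ch.length : Int)) :
    pvJstep costs i (dp ++ [z], ch ++ [w]) j
      = ((pvJstep costs i (dp, ch) j).1 ++ [z], (pvJstep costs i (dp, ch) j).2 ++ [w]) := by
  simp only [pvJstep]
  rw [pvGetD_append_left dp [z] (i-1) [] (by omega) (by omega),
      pvGetD_append_left dp [z] i [] (by omega) hdp,
      pvGetD_append_left ch [w] i [] (by omega) hch,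
      pvSetD_append_left dp [z] i _ (by omega) hdp,
      pvSetD_append_left ch [w] i _ (by omega) hch]
lemma pvAbody_len (costs : List (List Int)) (st : List (List Int) × List (List Int)) (i : Int) :
    (pvAbody costs st i).1.length = st.1.length ∧ (pvAbody costs st i).2.length = st.2.length := by
  have hr : PySem.List.pyRange 0 3 1 = [0,1,2] := by decide
  simp only [pvAbody, hr, List.foldl]
  simp [(pvJstep_len costs i _ _).1, (pvJstep_len costs i _ _).2]
lemma pvAbody_pad (costs : List (List Int)) (dp ch : List (List Int)) (z w : List Int) (i : Int)
    (h1 : 1 ≤ i) (hdp : i < (dp.length : Int)) (hch : i < (ch.length : Int)) :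
    pvAbody costs (dp ++ [z], ch ++ [w]) i
      = ((pvAbody costs (dp, ch) i).1 ++ [z], (pvAbody costs (dp, ch) i).2 ++ [w]) := by
  have hr : PySem.List.pyRange 0 3 1 = [0,1,2] := by decide
  simp only [pvAbody, hr, List.foldl]
  rw [pvJstep_pad costs dp ch z w i 0 h1 hdp hch]
  rw [pvJstep_pad costs _ _ z w i 1 h1 (by rw [(pvJstep_len costs i (dp,ch) 0).1]; exact hdp)
        (by rw [(pvJstep_len costs i (dp,ch) 0).2]; exact hch)]
  rw [pvJstep_pad costs _ _ z w i 2 h1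
        (by rw [(pvJstep_len costs i _ 1).1, (pvJstep_len costs i (dp,ch) 0).1]; exact hdp)
        (by rw [(pvJstep_len costs i _ 1).2, (pvJstep_len costs i (dp,ch) 0).2]; exact hch)]
lemma pvIfold_pad (costs : List (List Int)) (L : List Int) (dp ch : List (List Int)) (z w : List Int)
    (hL : ∀ i ∈ L, 1 ≤ i ∧ i < (dp.length : Int) ∧ i < (ch.length : Int)) :
    L.foldl (pvAbody costs) (dp ++ [z], ch ++ [w])
      = ((L.foldl (pvAbody costs) (dp, ch)).1 ++ [z], (L.foldl (pvAbody costs) (dp, ch)).2 ++ [w]) := by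
  induction L generalizing dp ch with
  | nil => simp
  | cons i L ih =>
    obtain ⟨h1, hdp, hch⟩ := hL i (by simp)
    simp only [List.foldl]
    rw [pvAbody_pad costs dp ch z w i h1 hdp hch]
    have := pvAbody_len costs (dp, ch) i
    rw [ih (pvAbody costs (dp, ch) i).1 (pvAbody costs (dp, ch) i).2
          (fun k hk => by obtain ⟨a,b,c⟩ := hL k (by simp [hk]); exact ⟨a, by rw [this.1]; exact b, by rw [this.2]; exact c⟩)]
lemma pvTrip_tripList (p : Int × Int × Int) : pvTrip (pvTripList p) = p := rfl

lemma pvAchain_len (p : Int × Int × Int) (rs : List (List Int)) :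
    (pvAchain p rs).2.1.length = rs.length ∧ (pvAchain p rs).2.2.length = rs.length := by
  induction rs generalizing p with
  | nil => simp [pvAchain]
  | cons r rs ih => simp [pvAchain, ih]

lemma pvAchain_snoc (p : Int × Int × Int) (rs : List (List Int)) (r : List Int) :
    pvAchain p (rs ++ [r])
      = (pvDpNext (pvAchain p rs).1 r,
         (pvAchain p rs).2.1 ++ [pvTripList (pvDpNext (pvAchain p rs).1 r)],
         (pvAchain p rs).2.2 ++ [pvChRow (pvAchain p rs).1]) := by
  induction rs generalizing p with
  | nil => simp [pvAchain]
  | cons q rs ih => simp [pvAchain, ih]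

lemma pvLastTrip (rs : List (List Int)) (hd : List Int) :
    pvTrip (PySem.List.pyGetD (hd :: (pvAchain (pvTrip hd) rs).2.1) ((rs.length : Int)) [])
      = (pvAchain (pvTrip hd) rs).1 := by
  induction rs generalizing hd with
  | nil => simp [pvAchain]
  | cons r rs ih =>
    have := ih (pvTripList (pvDpNext (pvTrip hd) r))
    rw [pvTrip_tripList] at this
    have hc : ((r :: rs).length : Int) = (((rs.length + 1 : Nat)) : Int) := by simp
    rw [pvAchain, hc, PySem.List.pyGetD_natCast]
    simp only [List.getD] at this ⊢
    simpa using this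

lemma pvAbody_costs_congr (costs costs' : List (List Int)) (st : List (List Int) × List (List Int))
    (i : Int) (h : PySem.List.pyGetD costs i [] = PySem.List.pyGetD costs' i []) :
    pvAbody costs st i = pvAbody costs' st i := by
  unfold pvAbody
  congr 1
  funext st j
  simp only [pvJstep, h]
lemma pvTables' (rest : List (List Int)) (hd : List Int) :
    (PySem.List.pyRange 1 ((rest.length : Int) + 1) 1).foldl (pvAbody (hd :: rest))
      (hd :: List.replicate rest.length [0,0,0], [-1,-1,-1] :: List.replicate rest.length [-1,-1,-1])
    = (hd :: (pvAchain (pvTrip hd) rest).2.1, [-1,-1,-1] :: (pvAchain (pvTrip hd) rest).2.2) := by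
  induction rest using List.reverseRecOn with
  | nil => simp [PySem.List.pyRange_one_eq_nil, pvAchain]
  | append_singleton rs r ih =>
    have hm : (((rs ++ [r]).length : Int) + 1) = ((rs.length : Int) + 1) + 1 := by simp
    have hsplit : PySem.List.pyRange 1 (((rs ++ [r]).length : Int) + 1) 1
        = PySem.List.pyRange 1 ((rs.length : Int) + 1) 1 ++ [(rs.length : Int) + 1] := by
      rw [hm, PySem.List.pyRange_one_succ_right (by omega)]
    have hinit1 : (hd :: List.replicate (rs ++ [r]).length ([0,0,0] : List Int))
        = (hd :: List.replicate rs.length [0,0,0]) ++ [[0,0,0]] := by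
      simp [List.replicate_succ']
    have hinit2 : (([-1,-1,-1] : List Int) :: List.replicate (rs ++ [r]).length ([-1,-1,-1] : List Int))
        = (([-1,-1,-1] : List Int) :: List.replicate rs.length [-1,-1,-1]) ++ [[-1,-1,-1]] := by
      simp [List.replicate_succ']
    rw [hsplit, hinit1, hinit2, List.foldl_append]
    have hcongr : (PySem.List.pyRange 1 ((rs.length : Int) + 1) 1).foldl (pvAbody (hd :: (rs ++ [r])))
          ((hd :: List.replicate rs.length [0,0,0]) ++ [[0,0,0]],
           (([-1,-1,-1] : List Int) :: List.replicate rs.length [-1,-1,-1]) ++ [[-1,-1,-1]])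
        = (PySem.List.pyRange 1 ((rs.length : Int) + 1) 1).foldl (pvAbody (hd :: rs))
          ((hd :: List.replicate rs.length [0,0,0]) ++ [[0,0,0]],
           (([-1,-1,-1] : List Int) :: List.replicate rs.length [-1,-1,-1]) ++ [[-1,-1,-1]]) := by
      apply PySem.List.foldl_congr_mem
      intro st i hi
      have hmem := (PySem.List.mem_pyRange_one).1 hi
      apply pvAbody_costs_congr
      rw [show (hd :: (rs ++ [r])) = (hd :: rs) ++ [r] from rfl]
      exact pvGetD_append_left (hd :: rs) [r] i [] (by omega) (by simp; omega)
    rw [hcongr]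
    rw [pvIfold_pad (hd :: rs) _ _ _ _ _ (fun i hi => by
      have hmem := (PySem.List.mem_pyRange_one).1 hi
      refine ⟨by omega, by simp; omega, by simp; omega⟩)]
    rw [ih]
    -- last step
    have hXlen : (hd :: (pvAchain (pvTrip hd) rs).2.1).length = rs.length + 1 := by
      simp [(pvAchain_len (pvTrip hd) rs).1]
    have hXclen : (([-1,-1,-1] : List Int) :: (pvAchain (pvTrip hd) rs).2.2).length = rs.length + 1 := by
      simp [(pvAchain_len (pvTrip hd) rs).2]
    have hidx : ((rs.length : Int) + 1) = (((hd :: (pvAchain (pvTrip hd) rs).2.1).length : Int)) := by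
      rw [hXlen]; push_cast; ring
    simp only [List.foldl_cons, List.foldl_nil]
    rw [hidx]
    rw [pvAbody_eval (hd :: (rs ++ [r])) (hd :: (pvAchain (pvTrip hd) rs).2.1)
          (([-1,-1,-1] : List Int) :: (pvAchain (pvTrip hd) rs).2.2) _
          (by omega) (by omega) rfl]
    have hprevTrip : pvTrip (PySem.List.pyGetD (hd :: (pvAchain (pvTrip hd) rs).2.1) (((hd :: (pvAchain (pvTrip hd) rs).2.1).length : Int) - 1) []) = (pvAchain (pvTrip hd) rs).1 := by
      have := pvLastTrip rs hd
      rw [show (((hd :: (pvAchain (pvTrip hd) rs).2.1).length : Int) - 1) = ((rs.length : Int)) from by rw [hXlen]; push_cast; ring]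
      exact this
    have hrow : PySem.List.pyGetD (hd :: (rs ++ [r])) (((hd :: (pvAchain (pvTrip hd) rs).2.1).length : Int)) [] = r := by
      rw [show (hd :: (rs ++ [r])) = (hd :: rs) ++ r :: [] from rfl,
          show (((hd :: (pvAchain (pvTrip hd) rs).2.1).length : Int)) = (((hd :: rs).length : Int)) from by simp [hXlen]]
      exact pvGetD_append_length (hd :: rs) r [] []
    rw [hprevTrip, hrow, pvAchain_snoc]
    rfl


-- the port-A i-fold, with its initial tables, builds exactly the chain tables
lemma pvTables (hd : List Int) (rest : List (List Int)) :
    (PySem.List.pyRange 1 (((hd :: rest).length : Int)) 1).foldl (pvAbody (hd :: rest))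
        (PySem.List.pySetD ((List.range (hd :: rest).length).map (fun _ => List.replicate 3 (0:Int))) 0
          (PySem.List.pyGetD (hd :: rest) 0 []),
         (List.range (hd :: rest).length).map (fun _ => List.replicate 3 (-1:Int)))
      = (hd :: (pvAchain (pvTrip hd) rest).2.1, [-1,-1,-1] :: (pvAchain (pvTrip hd) rest).2.2) := by
  have h1 : PySem.List.pyGetD (hd :: rest) 0 [] = hd := by
    simp [PySem.List.pyGetD_zero]
  have h2 : ∀ (c : List Int), (List.range (hd :: rest).length).map (fun _ => c)
      = c :: List.replicate rest.length c := by
    intro c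
    rw [List.map_const']
    simp [List.replicate_succ]
  have h3 : PySem.List.pySetD (([0,0,0] : List Int) :: List.replicate rest.length [0,0,0]) 0 hd
      = hd :: List.replicate rest.length [0,0,0] := by
    rw [PySem.List.pySetD_of_nonneg _ _ (by omega)]
    rfl
  have h4 : (((hd :: rest).length : Int)) = ((rest.length : Int) + 1) := by simp
  rw [h1, h2, h2, h4, show (List.replicate 3 (0:Int)) = [0,0,0] from rfl,
      show (List.replicate 3 (-1:Int)) = [-1,-1,-1] from rfl, h3]
  exact pvTables' rest hd

-- the backtracking fold is pvBt on the reversed choice table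
lemma pvBtFold (T : List (List Int)) (cur : Int) (acc : List Int) :
    ((PySem.List.pyRange ((T.length : Int) - 1) (-1) (-1)).foldl
        (fun (st : List Int × Int) i =>
          (st.1 ++ [st.2], PySem.List.pyGetD (PySem.List.pyGetD T i []) st.2 0)) (acc, cur)).1
      = acc ++ pvBt T.reverse cur := by
  induction T using List.reverseRecOn generalizing cur acc with
  | nil => simp [PySem.List.pyRange_neg_one_eq_nil, pvBt]
  | append_singleton X row ih =>
    have hlen : (((X ++ [row]).length : Int) - 1) = (X.length : Int) := by simp
    rw [hlen]
    by_cases hX : X = []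
    · subst hX
      simp only [List.length_nil, Nat.cast_zero]
      rw [show PySem.List.pyRange 0 (-1) (-1) = [0] from by decide]
      simp [pvBt, PySem.List.pyGetD_zero, List.foldl]
    · have hpos : (0:Int) < (X.length : Int) := by
        simp [List.length_pos_iff]; exact hX
      rw [PySem.List.pyRange_neg_one_cons (by omega)]
      simp only [List.foldl_cons]
      rw [pvGetD_append_length X row [] []]
      have hcongr : (PySem.List.pyRange ((X.length : Int) - 1) (-1) (-1)).foldl
            (fun (st : List Int × Int) i =>
              (st.1 ++ [st.2], PySem.List.pyGetD (PySem.List.pyGetD (X ++ [row]) i []) st.2 0))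
            (acc ++ [cur], PySem.List.pyGetD row cur 0)
          = (PySem.List.pyRange ((X.length : Int) - 1) (-1) (-1)).foldl
            (fun (st : List Int × Int) i =>
              (st.1 ++ [st.2], PySem.List.pyGetD (PySem.List.pyGetD X i []) st.2 0))
            (acc ++ [cur], PySem.List.pyGetD row cur 0) := by
        apply PySem.List.foldl_congr_mem
        intro st i hi
        have := (PySem.List.mem_pyRange_neg_one).1 hi
        rw [pvGetD_append_left X [row] i [] (by omega) (by omega)]
      rw [hcongr, ih]
      simp [pvBt]

-- B's fold is pvBmodel
lemma pvBfold (rest : List (List Int)) (s : PvBSt) :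
    rest.foldl (fun (s : PvBSt) row =>
      let ca := s.1.1; let pa := s.1.2
      let cb := s.2.1.1; let pb := s.2.1.2
      let cc := s.2.2.1; let pc := s.2.2.2
      let n0 := if cb ≤ cc then (PySem.List.pyGetD row 0 0 + cb, pb ++ [(0:Int)])
                else (PySem.List.pyGetD row 0 0 + cc, pc ++ [(0:Int)])
      let n1 := if ca ≤ cc then (PySem.List.pyGetD row 1 0 + ca, pa ++ [(1:Int)])
                else (PySem.List.pyGetD row 1 0 + cc, pc ++ [(1:Int)])
      let n2 := if ca ≤ cb then (PySem.List.pyGetD row 2 0 + ca, pa ++ [(2:Int)])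
                else (PySem.List.pyGetD row 2 0 + cb, pb ++ [(2:Int)])
      (n0, n1, n2)) s
    = pvBmodel s rest := by
  induction rest generalizing s with
  | nil => rfl
  | cons row rest ih => simp only [List.foldl_cons, pvBmodel]; exact ih _

def pvProjC (s : PvBSt) : Int × Int × Int := (s.1.1, s.2.1.1, s.2.2.1)

-- the cost triple threaded by pvBmodel is the chain's final dp triple
lemma pvBmodel_fst (rest : List (List Int)) (s : PvBSt) :
    pvProjC (pvBmodel s rest) = (pvAchain (pvProjC s) rest).1 := by
  induction rest generalizing s with
  | nil => rfl
  | cons row rest ih =>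
    simp only [pvBmodel, pvAchain]
    rw [ih]
    congr 1
    simp only [pvProjC, pvDpNext, pvPick]
    split_ifs <;> simp [PySem.List.pyGetD_ofNat'] <;> omega

-- KEY: the paths threaded forward are the backtracked paths, reversed
lemma pvPaths (rest : List (List Int)) (s : PvBSt) (Z : List (List Int))
    (H0 : s.1.2 = (pvBt Z 0).reverse) (H1 : s.2.1.2 = (pvBt Z 1).reverse)
    (H2 : s.2.2.2 = (pvBt Z 2).reverse) :
    (pvBmodel s rest).1.2 = (pvBt ((pvAchain (pvProjC s) rest).2.2.reverse ++ Z) 0).reverse ∧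
    (pvBmodel s rest).2.1.2 = (pvBt ((pvAchain (pvProjC s) rest).2.2.reverse ++ Z) 1).reverse ∧
    (pvBmodel s rest).2.2.2 = (pvBt ((pvAchain (pvProjC s) rest).2.2.reverse ++ Z) 2).reverse := by
  induction rest generalizing s Z with
  | nil => simp [pvBmodel, pvAchain, H0, H1, H2]
  | cons row rest ih =>
    simp only [pvBmodel, pvAchain]
    have hch : ∀ j : Int, (j = 0 ∨ j = 1 ∨ j = 2) →
        PySem.List.pyGetD (pvChRow (pvProjC s)) j 0 = (pvPick (pvProjC s) j).2 := by
      intro j hj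
      rcases hj with h | h | h <;> subst h <;>
        simp [pvChRow, PySem.List.pyGetD_ofNat']
    have hZ : ∀ j : Int, (j = 0 ∨ j = 1 ∨ j = 2) →
        (pvBt (pvChRow (pvProjC s) :: Z) j).reverse
          = (pvBt Z (pvPick (pvProjC s) j).2).reverse ++ [j] := by
      intro j hj
      simp [pvBt, hch j hj]
    have := ih
      ((if s.2.1.1 ≤ s.2.2.1 then (PySem.List.pyGetD row 0 0 + s.2.1.1, s.2.1.2 ++ [(0:Int)])
        else (PySem.List.pyGetD row 0 0 + s.2.2.1, s.2.2.2 ++ [(0:Int)])),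
       (if s.1.1 ≤ s.2.2.1 then (PySem.List.pyGetD row 1 0 + s.1.1, s.1.2 ++ [(1:Int)])
        else (PySem.List.pyGetD row 1 0 + s.2.2.1, s.2.2.2 ++ [(1:Int)])),
       (if s.1.1 ≤ s.2.1.1 then (PySem.List.pyGetD row 2 0 + s.1.1, s.1.2 ++ [(2:Int)])
        else (PySem.List.pyGetD row 2 0 + s.2.1.1, s.2.1.2 ++ [(2:Int)])))
      (pvChRow (pvProjC s) :: Z) ?_ ?_ ?_
    · have hproj : pvProjC
          ((if s.2.1.1 ≤ s.2.2.1 then (PySem.List.pyGetD row 0 0 + s.2.1.1, s.2.1.2 ++ [(0:Int)])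
            else (PySem.List.pyGetD row 0 0 + s.2.2.1, s.2.2.2 ++ [(0:Int)])),
           (if s.1.1 ≤ s.2.2.1 then (PySem.List.pyGetD row 1 0 + s.1.1, s.1.2 ++ [(1:Int)])
            else (PySem.List.pyGetD row 1 0 + s.2.2.1, s.2.2.2 ++ [(1:Int)])),
           (if s.1.1 ≤ s.2.1.1 then (PySem.List.pyGetD row 2 0 + s.1.1, s.1.2 ++ [(2:Int)])
            else (PySem.List.pyGetD row 2 0 + s.2.1.1, s.2.1.2 ++ [(2:Int)])))
          = pvDpNext (pvProjC s) row := by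
        simp only [pvProjC, pvDpNext, pvPick]
        split_ifs <;> simp [PySem.List.pyGetD_ofNat'] <;> omega
      rw [hproj] at this
      simpa [List.append_assoc] using this
    · -- path hypotheses for the extended Z
      rw [hZ 0 (by omega)]
      simp [pvPick, pvProjC]
      split_ifs <;> simp [H1, H2]
    · rw [hZ 1 (by omega)]
      simp [pvPick, pvProjC]
      split_ifs <;> simp [H0, H2]
    · rw [hZ 2 (by omega)]
      simp [pvPick, pvProjC]
      split_ifs <;> simp [H0, H1]

-- last dp row of the table
lemma pvLastRow (hd : List Int) (rest : List (List Int)) (hne : rest ≠ []) :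
    PySem.List.pyGetD (hd :: (pvAchain (pvTrip hd) rest).2.1) (-1) []
      = pvTripList (pvAchain (pvTrip hd) rest).1 := by
  induction rest using List.reverseRecOn with
  | nil => exact absurd rfl hne
  | append_singleton rs r _ =>
    rw [pvAchain_snoc]
    rw [show (hd :: ((pvAchain (pvTrip hd) rs).2.1 ++ [pvTripList (pvDpNext (pvAchain (pvTrip hd) rs).1 r)]))
        = (hd :: (pvAchain (pvTrip hd) rs).2.1) ++ [pvTripList (pvDpNext (pvAchain (pvTrip hd) rs).1 r)] from rfl]
    exact PySem.List.pyGetD_neg_one_append_singleton _ _ _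

-- min then index over a literal 3-row = the first-wins comparison chain
lemma pvMinInd (x y z : Int) :
    (((PySem.List.min? [x,y,z] id).getD 0 : Int),
      (((PySem.List.index? [x,y,z] ((PySem.List.min? [x,y,z] id).getD 0)).getD 0 : Nat) : Int))
    = (if x ≤ y ∧ x ≤ z then (x, 0) else if y ≤ z then (y, 1) else (z, 2)) := by
  by_cases h1 : y < x <;> by_cases h2 : z < y <;> by_cases h3 : z < x <;>
    simp [PySem.List.min?, List.idxOf?, List.findIdx?, List.findIdx?.go, h1, h2, h3,
      beq_iff_eq] <;>
    split_ifs <;> simp_all <;> omega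

-- min/index over the whole single-day row, when nothing past index 2 is strictly smaller
lemma pvMinIndExt (x y z : Int) (tail : List Int)
    (h : ∀ v ∈ tail, min (min x y) z ≤ v) :
    (((PySem.List.min? (x :: y :: z :: tail) id).getD 0 : Int),
      (((PySem.List.index? (x :: y :: z :: tail)
          ((PySem.List.min? (x :: y :: z :: tail) id).getD 0)).getD 0 : Nat) : Int))
    = (if x ≤ y ∧ x ≤ z then (x, 0) else if y ≤ z then (y, 1) else (z, 2)) := by
  obtain ⟨m, hm⟩ : ∃ m, PySem.List.min? (x :: y :: z :: tail) id = some m := by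
    cases hmm : PySem.List.min? (x :: y :: z :: tail) id with
    | none => exact absurd ((PySem.List.min?_eq_none_iff _ _).1 hmm) (by simp)
    | some m => exact ⟨m, rfl⟩
  have hmem := PySem.List.min?_mem hm
  have hmin := PySem.List.min?_isMin hm
  have hx : m ≤ x := by simpa using hmin x (by simp)
  have hy : m ≤ y := by simpa using hmin y (by simp)
  have hz : m ≤ z := by simpa using hmin z (by simp)
  have hge : min (min x y) z ≤ m := by
    simp only [List.mem_cons] at hmem
    rcases hmem with rfl | rfl | rfl | hm2
    · simp [min_def]; split_ifs <;> omega
    · simp [min_def]; split_ifs <;> omega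
    · simp [min_def]; split_ifs <;> omega
    · exact h m hm2
  have hmval : m = if x ≤ y ∧ x ≤ z then x else if y ≤ z then y else z := by
    simp only [min_def] at hge
    split_ifs at hge ⊢ <;> omega
  have hm3 : m ∈ ([x,y,z] : List Int) := by
    rw [hmval]; split_ifs <;> simp
  have hidx : PySem.List.index? (x :: y :: z :: tail) m = PySem.List.index? [x,y,z] m :=
    PySem.List.index?_append_of_mem tail hm3
  have hsm : (PySem.List.min? [x,y,z] id).getD 0 = m := by
    have := congrArg Prod.fst (pvMinInd x y z)
    simp only at this
    rw [this, hmval]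
    split_ifs <;> rfl
  rw [hm]
  simp only [Option.getD_some]
  rw [hidx, ← hsm]
  exact pvMinInd x y z

-- the final phase of port A (min, first index, backtrack), as one function
def pvFinish (n : Int) (st : List (List Int) × List (List Int)) : Int × List Int :=
  ((PySem.List.min? (PySem.List.pyGetD st.1 (-1) []) id).getD 0,
   ((PySem.List.pyRange (n-1) (-1) (-1)).foldl (fun (q : List Int × Int) i =>
      (q.1 ++ [q.2], PySem.List.pyGetD (PySem.List.pyGetD st.2 i []) q.2 0))
     ([], (((PySem.List.index? (PySem.List.pyGetD st.1 (-1) [])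
        ((PySem.List.min? (PySem.List.pyGetD st.1 (-1) []) id).getD 0)).getD 0 : Nat) : Int))).1.reverse)

lemma pvA_cons (hd : List Int) (rest : List (List Int)) :
    minimize_cost_with_choices (hd :: rest)
      = pvFinish (((hd :: rest).length : Int))
          ((PySem.List.pyRange 1 (((hd :: rest).length : Int)) 1).foldl (pvAbody (hd :: rest))
            (PySem.List.pySetD ((List.range (hd :: rest).length).map (fun _ => List.replicate 3 (0:Int))) 0
              (PySem.List.pyGetD (hd :: rest) 0 []),
             (List.range (hd :: rest).length).map (fun _ => List.replicate 3 (-1:Int)))) := rfl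

lemma pvB_cons (hd : List Int) (rest : List (List Int)) :
    minimize_cost_with_choices_alt (hd :: rest)
      = (let s := pvBmodel ((PySem.List.pyGetD hd 0 0, [(0:Int)]),
            (PySem.List.pyGetD hd 1 0, [(1:Int)]), (PySem.List.pyGetD hd 2 0, [(2:Int)])) rest
         if s.1.1 ≤ s.2.1.1 ∧ s.1.1 ≤ s.2.2.1 then (s.1.1, s.1.2)
         else if s.2.1.1 ≤ s.2.2.1 then (s.2.1.1, s.2.1.2)
         else (s.2.2.1, s.2.2.2)) := by
  exact congrArg (fun s : PvBSt =>
    if s.1.1 ≤ s.2.1.1 ∧ s.1.1 ≤ s.2.2.1 then (s.1.1, s.1.2)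
    else if s.2.1.1 ≤ s.2.2.1 then (s.2.1.1, s.2.1.2)
    else (s.2.2.1, s.2.2.2))
    (pvBfold rest ((PySem.List.pyGetD hd 0 0, [(0:Int)]),
      (PySem.List.pyGetD hd 1 0, [(1:Int)]), (PySem.List.pyGetD hd 2 0, [(2:Int)])))

lemma pvMainCons (hd : List Int) (rest : List (List Int)) (hne : rest ≠ []) :
    minimize_cost_with_choices (hd :: rest) = minimize_cost_with_choices_alt (hd :: rest) := by
  rw [pvA_cons, pvTables, pvB_cons]
  -- initial B state and its projections
  set s0 : PvBSt := ((PySem.List.pyGetD hd 0 0, [(0:Int)]),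
      (PySem.List.pyGetD hd 1 0, [(1:Int)]), (PySem.List.pyGetD hd 2 0, [(2:Int)])) with hs0
  have hproj : pvProjC s0 = pvTrip hd := by
    simp [hs0, pvProjC, pvTrip, PySem.List.pyGetD_ofNat']
  have hcost := pvBmodel_fst rest s0
  have hpaths := pvPaths rest s0 [[-1,-1,-1]] rfl rfl rfl
  rw [hproj] at hcost hpaths
  -- A's last dp row
  have hlast := pvLastRow hd rest hne
  -- A's backtracking = pvBt over the reversed choice table
  have hT : ∀ cur : Int,
      ((PySem.List.pyRange ((((hd :: rest).length : Int)) - 1) (-1) (-1)).foldl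
        (fun (q : List Int × Int) i =>
          (q.1 ++ [q.2],
            PySem.List.pyGetD (PySem.List.pyGetD ([-1,-1,-1] :: (pvAchain (pvTrip hd) rest).2.2) i []) q.2 0))
        ([], cur)).1
      = pvBt ((pvAchain (pvTrip hd) rest).2.2.reverse ++ [[-1,-1,-1]]) cur := by
    intro cur
    have hlen : (((hd :: rest).length : Int)) - 1
        = ((([-1,-1,-1] :: (pvAchain (pvTrip hd) rest).2.2).length : Int)) - 1 := by
      simp [(pvAchain_len (pvTrip hd) rest).2]
    rw [hlen, pvBtFold ([-1,-1,-1] :: (pvAchain (pvTrip hd) rest).2.2) cur []]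
    simp
  -- destructure the final dp triple
  rcases hq : (pvAchain (pvTrip hd) rest).1 with ⟨x, y, z⟩
  rw [hq] at hcost hlast
  simp only [pvTripList] at hlast
  simp only [pvProjC, Prod.ext_iff] at hcost
  obtain ⟨hcx, hcy, hcz⟩ := hcost
  obtain ⟨hp0, hp1, hp2⟩ := hpaths
  simp only [pvFinish]
  rw [hlast, hT]
  have hmi := pvMinInd x y z
  by_cases h1 : x ≤ y ∧ x ≤ z
  · rw [if_pos h1] at hmi
    have hm := congrArg Prod.fst hmi
    have hl := congrArg Prod.snd hmi
    simp only at hm hl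
    rw [hl, hm, if_pos (by rw [hcx, hcy, hcz]; exact h1)]
    rw [hcx, hp0]
  · rw [if_neg h1] at hmi
    rw [if_neg (by rw [hcx, hcy, hcz]; exact h1)]
    by_cases h2 : y ≤ z
    · rw [if_pos h2] at hmi
      have hm := congrArg Prod.fst hmi
      have hl := congrArg Prod.snd hmi
      simp only at hm hl
      rw [hl, hm, if_pos (by rw [hcy, hcz]; exact h2)]
      rw [hcy, hp1]
    · rw [if_neg h2] at hmi
      have hm := congrArg Prod.fst hmi
      have hl := congrArg Prod.snd hmi
      simp only at hm hl
      rw [hl, hm, if_neg (by rw [hcy, hcz]; exact h2)]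
      rw [hcz, hp2]

lemma pvMainNil (hd : List Int) (hhd : 3 ≤ hd.length)
    (hsing : ∀ v ∈ hd.drop 3, min (min (hd.getD 0 0) (hd.getD 1 0)) (hd.getD 2 0) ≤ v) :
    minimize_cost_with_choices [hd] = minimize_cost_with_choices_alt [hd] := by
  rcases hd with _ | ⟨x, _ | ⟨y, _ | ⟨z, tail⟩⟩⟩ <;> simp at hhd
  have htail : ∀ v ∈ tail, min (min x y) z ≤ v := by simpa using hsing
  rw [pvA_cons, pvTables, pvB_cons]
  simp only [pvAchain]
  have hmi := pvMinIndExt x y z tail htail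
  simp only [pvFinish]
  rw [show PySem.List.pyGetD [(x :: y :: z :: tail)] (-1) ([] : List Int) = x :: y :: z :: tail
        from rfl]
  rw [show ((((x :: y :: z :: tail) :: ([] : List (List Int))).length : Int)) - 1 = 0 from by simp]
  rw [show PySem.List.pyRange 0 (-1) (-1) = [0] from by decide]
  simp only [List.foldl_cons, List.foldl_nil, pvBmodel]
  by_cases h1 : x ≤ y ∧ x ≤ z
  · rw [if_pos h1] at hmi
    have hm := congrArg Prod.fst hmi
    have hl := congrArg Prod.snd hmi
    simp only at hm hl
    rw [hl, hm]
    rw [if_pos (by simp [PySem.List.pyGetD_ofNat']; constructor <;> [exact h1.1; exact h1.2])]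
    simp [PySem.List.pyGetD_zero]
  · rw [if_neg h1] at hmi
    rw [if_neg (by simp [PySem.List.pyGetD_ofNat']; intro hxy; by_contra hxz; exact h1 ⟨hxy, by omega⟩)]
    by_cases h2 : y ≤ z
    · rw [if_pos h2] at hmi
      have hm := congrArg Prod.fst hmi
      have hl := congrArg Prod.snd hmi
      simp only at hm hl
      rw [hl, hm]
      rw [if_pos (by simp [PySem.List.pyGetD_ofNat']; exact h2)]
      simp [PySem.List.pyGetD_ofNat']
    · rw [if_neg h2] at hmi
      have hm := congrArg Prod.fst hmi
      have hl := congrArg Prod.snd hmi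
      simp only at hm hl
      rw [hl, hm]
      rw [if_neg (by simp [PySem.List.pyGetD_ofNat']; omega)]
      simp [PySem.List.pyGetD_ofNat']

lemma pvMain (hd : List Int) (rest : List (List Int)) (hhd : 3 ≤ hd.length)
    (hsing : rest = [] → ∀ v ∈ hd.drop 3, min (min (hd.getD 0 0) (hd.getD 1 0)) (hd.getD 2 0) ≤ v) :
    minimize_cost_with_choices (hd :: rest) = minimize_cost_with_choices_alt (hd :: rest) := by
  cases rest with
  | nil => exact pvMainNil hd hhd (hsing rfl)
  | cons r rs => exact pvMainCons hd (r :: rs) (by simp)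

-- ===== VERDICT (by name: the statement is the Claim_ definition above) =====
theorem minimize_cost_with_choices_spec : Claim_equal_minimize_cost_with_choices := by
  intro costs _ hpre
  show minimize_cost_with_choices costs = minimize_cost_with_choices_alt costs
  match costs with
  | [] => rfl
  | hd :: rest =>
    exact pvMain hd rest (hpre.1 hd (by simp))
      (fun hrest => by subst hrest; exact hpre.2 (by simp) hd (by simp))
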